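-- pv_equiv track=rewrite | github.com/AndreyRub/LoveLetter | build_scenarios.py | find_order_from_sequence
-- ===== SOURCE A (Python) =====
-- def find_order_from_sequence(initial_sequence, new_sequence):
--     initial_temp = initial_sequence + [None]
--     num_of_elements = len(initial_sequence)
--     order = [0]*num_of_elements
--     for i in range(num_of_elements):
--         order[i] = initial_temp.index(new_sequence[i])
--         initial_temp[order[i]]=None
--     return order
-- ===== SOURCE B (Python) =====
-- def find_order_from_sequence(initial_sequence, new_sequence):
--     positions = {}
--     for idx, v in enumerate(initial_sequence):
--         positions.setdefault(v, []).append(idx)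
--     cursor = {}
--     out = []
--     for v in new_sequence[:len(initial_sequence)]:
--         c = cursor.get(v, 0)
--         cursor[v] = c + 1
--         out.append(positions[v][c])
--     return out
-- ===== Notes on version B (the rewrite author's own statement) =====
-- stated objective: faster
-- what changed: replaces the quadratic scan-and-blank loop (list.index over a mutated copy per element) with a single pass building a value-to-occurrence-indices dict plus per-value cursors, one O(1) lookup per element
import Mathlib
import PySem

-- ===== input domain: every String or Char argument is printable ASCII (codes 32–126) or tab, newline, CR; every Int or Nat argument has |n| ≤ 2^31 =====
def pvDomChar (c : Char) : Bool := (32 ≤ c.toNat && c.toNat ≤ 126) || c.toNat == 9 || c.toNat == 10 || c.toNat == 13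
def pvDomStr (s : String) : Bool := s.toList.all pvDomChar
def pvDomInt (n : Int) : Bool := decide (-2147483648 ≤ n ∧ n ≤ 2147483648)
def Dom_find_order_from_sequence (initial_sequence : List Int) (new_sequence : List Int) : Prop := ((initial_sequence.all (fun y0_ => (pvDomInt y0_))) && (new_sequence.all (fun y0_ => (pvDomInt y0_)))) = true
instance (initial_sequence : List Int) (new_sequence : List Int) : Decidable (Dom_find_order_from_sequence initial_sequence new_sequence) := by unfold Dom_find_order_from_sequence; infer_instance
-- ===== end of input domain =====

-- B replaces A's quadratic scan-and-blank loop with a value→occurrence-indices dict and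
-- per-value cursors (one pass to build, O(1) per looked-up element); return values agree on Pre_.

-- ===== PORT A =====
-- the body of A's for-loop: order[i] = initial_temp.index(new_sequence[i]); initial_temp[order[i]] = None
def aStep (new_sequence : List Int) (st : List Int × List (Option Int)) (i : Int) :
    List Int × List (Option Int) :=
  match PySem.List.pyGet? new_sequence i with
  | none => st      -- IndexError: excluded by Pre_
  | some v =>
    match PySem.List.index? st.2 (some v) with
    | none => st    -- ValueError: excluded by Pre_
    | some j => (st.1.set i.toNat (j : Int), st.2.set j none)

def find_order_from_sequence (initial_sequence : List Int) (new_sequence : List Int) : List Int :=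
  let initial_temp : List (Option Int) := initial_sequence.map some ++ [none]
  let num_of_elements := initial_sequence.length
  let order := List.replicate num_of_elements (0 : Int)
  ((PySem.List.pyRange 0 (num_of_elements : Int) 1).foldl (aStep new_sequence)
    (order, initial_temp)).1

-- ===== PORT B =====
-- positions.setdefault(v, []).append(idx)
def bPositions (initial_sequence : List Int) : PySem.Dict Int (List Int) :=
  (PySem.List.enumerate initial_sequence 0).foldl
    (fun d p => d.modify p.2 [] (· ++ [p.1])) PySem.Dict.empty

-- the body of B's second loop: c = cursor.get(v, 0); cursor[v] = c + 1; out.append(positions[v][c])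
def bStep (positions : PySem.Dict Int (List Int)) (st : List Int × PySem.Dict Int Int)
    (v : Int) : List Int × PySem.Dict Int Int :=
  let c := st.2.getD v 0
  let cursor := st.2.insert v (c + 1)
  let j := (positions.getD v []).getD c.toNat 0   -- KeyError / IndexError: excluded by Pre_
  (st.1 ++ [j], cursor)

def find_order_from_sequence_alt (initial_sequence : List Int) (new_sequence : List Int) : List Int :=
  let positions := bPositions initial_sequence
  ((new_sequence.take initial_sequence.length).foldl (bStep positions)
    ([], PySem.Dict.empty)).1

-- ===== PRECONDITION & SPEC =====
-- Pre_ holds exactly where A returns: new_sequence must reach initial_sequence's length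
-- (else IndexError) and each prefix element must still be matchable (else ValueError).
def Pre_find_order_from_sequence (initial_sequence : List Int) (new_sequence : List Int) : Prop :=
  initial_sequence.length ≤ new_sequence.length ∧
  ∀ v ∈ new_sequence.take initial_sequence.length,
    (new_sequence.take initial_sequence.length).count v ≤ initial_sequence.count v
instance (initial_sequence : List Int) (new_sequence : List Int) : Decidable (Pre_find_order_from_sequence initial_sequence new_sequence) := by unfold Pre_find_order_from_sequence; infer_instance

def pvWitness_find_order_from_sequence : List Int × List Int := ([1, 2, 1], [2, 1, 1])

def Spec_find_order_from_sequence (initial_sequence : List Int) (new_sequence : List Int) (out : List Int) : Prop := out = find_order_from_sequence_alt initial_sequence new_sequence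
instance (initial_sequence : List Int) (new_sequence : List Int) (out : List Int) : Decidable (Spec_find_order_from_sequence initial_sequence new_sequence out) := by unfold Spec_find_order_from_sequence; infer_instance

-- ===== CLAIM (what is proved, stated in full; the proofs are below) =====
def Claim_equal_find_order_from_sequence : Prop := ∀ (initial_sequence : List Int) (new_sequence : List Int), Dom_find_order_from_sequence initial_sequence new_sequence → Pre_find_order_from_sequence initial_sequence new_sequence → Spec_find_order_from_sequence initial_sequence new_sequence (find_order_from_sequence initial_sequence new_sequence)
-- ===== LEMMAS AND PROOFS =====

-- A's blanked working list after consuming, for every value v, the first (f v) occurrences of v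
def mask : List Int → (Int → Nat) → List (Option Int)
  | [], _ => []
  | x :: xs, f => (if f x = 0 then some x else none) :: mask xs (fun y => if y = x then f y - 1 else f y)

-- the Int indices of the occurrences of v in init (what bPositions stores under key v)
def occs (init : List Int) (v : Int) : List Int :=
  ((PySem.List.enumerate init 0).filter (fun p => p.2 == v)).map (·.1)

theorem mask_zero (init : List Int) : mask init (fun _ => 0) = init.map some := by
  induction init with
  | nil => rfl
  | cons x xs ih => simp [mask, ih]

theorem enumerate_filter_shift (xs : List Int) (v : Int) : ∀ (s : Int),
    ((PySem.List.enumerate xs s).filter (fun p => p.2 == v)).map (·.1)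
      = (((PySem.List.enumerate xs 0).filter (fun p => p.2 == v)).map (·.1)).map (· + s) := by
  induction xs with
  | nil => intro s; simp [PySem.List.enumerate_nil]
  | cons x xs ih =>
    intro s
    simp only [PySem.List.enumerate_cons, List.filter_cons]
    by_cases h : x = v <;>
      simp [h, ih (s + 1), ih 1, List.map_map, Function.comp] <;> intros <;> ring

theorem occs_cons (x : Int) (xs : List Int) (v : Int) :
    occs (x :: xs) v = (if x = v then [(0 : Int)] else []) ++ (occs xs v).map (· + 1) := by
  unfold occs
  simp only [PySem.List.enumerate_cons, List.filter_cons]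
  by_cases h : x = v <;> simp [h, enumerate_filter_shift xs v 1]

theorem length_occs (init : List Int) (v : Int) : (occs init v).length = init.count v := by
  induction init with
  | nil => simp [occs, PySem.List.enumerate_nil]
  | cons x xs ih =>
    rw [occs_cons]
    by_cases h : x = v <;> simp [h, ih]

theorem mask_cons (x : Int) (xs : List Int) (f : Int → Nat) :
    mask (x :: xs) f
      = (if f x = 0 then some x else none) :: mask xs (fun y => if y = x then f y - 1 else f y) := rfl

theorem length_mask (init : List Int) : ∀ f, (mask init f).length = init.length := by
  induction init with
  | nil => intro f; rfl
  | cons x xs ih => intro f; simp [mask, ih]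

-- the key step: looking up v by list.index in the masked list finds the (f v)-th occurrence
theorem mask_index (init : List Int) (v : Int) : ∀ (f : Int → Nat), f v < init.count v →
    ∃ j : Nat, PySem.List.index? (mask init f) (some v) = some j ∧ j < init.length ∧
      (j : Int) = (occs init v).getD (f v) 0 ∧
      (mask init f).set j none = mask init (fun y => if y = v then f y + 1 else f y) := by
  induction init with
  | nil => intro f h; simp at h
  | cons x xs ih =>
    intro f h
    by_cases hxv : x = v
    · subst hxv
      by_cases hf : f x = 0
      · refine ⟨0, ?_, by simp, by simp [occs_cons, hf], ?_⟩
        · rw [mask_cons, if_pos hf]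
          exact PySem.List.index?_cons_self _ _
        · rw [mask_cons, if_pos hf, List.set_cons_zero, mask_cons,
            if_neg (by simp : ¬ (if x = x then f x + 1 else f x) = 0)]
          have hg : (fun y => if y = x then f y - 1 else f y)
              = (fun y => if y = x then (if y = x then f y + 1 else f y) - 1
                  else (if y = x then f y + 1 else f y)) := by
            funext y
            by_cases hy : y = x
            · simp [hy]; omega
            · simp [hy]
          rw [← hg]
      · have hcnt : f x - 1 < xs.count x := by
          rw [List.count_cons_self] at h; omega
        obtain ⟨j, hidx, hjlt, hjval, hset⟩ :=
          ih (fun y => if y = x then f y - 1 else f y) (by simpa using hcnt)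
        simp only [if_true] at hjval
        refine ⟨j + 1, ?_, by simpa using hjlt, ?_, ?_⟩
        · rw [mask_cons, if_neg hf,
            PySem.List.index?_cons_of_ne _ (by simp : (none : Option Int) ≠ some x), hidx]
          rfl
        · have hlen : f x - 1 < (occs xs x).length := by rw [length_occs]; exact hcnt
          rw [occs_cons, if_pos rfl]
          rw [show f x = (f x - 1) + 1 from by omega]
          simp only [List.singleton_append, List.getD_cons_succ]
          rw [List.getD_eq_getElem _ _ (by simpa using hlen), List.getElem_map]
          rw [List.getD_eq_getElem _ _ hlen] at hjval
          push_cast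
          omega
        · rw [mask_cons, if_neg hf, List.set_cons_succ, hset, mask_cons,
            if_neg (by simp : ¬ (if x = x then f x + 1 else f x) = 0)]
          have hg : (fun y => if y = x then (if y = x then f y - 1 else f y) + 1
                  else (if y = x then f y - 1 else f y))
              = (fun y => if y = x then (if y = x then f y + 1 else f y) - 1
                  else (if y = x then f y + 1 else f y)) := by
            funext y
            by_cases hy : y = x
            · simp [hy]; omega
            · simp [hy]
          rw [hg]
    · have hxv' : ¬ v = x := fun hh => hxv hh.symm
      have hcnt : f v < xs.count v := by
        rwa [List.count_cons_of_ne hxv] at h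
      obtain ⟨j, hidx, hjlt, hjval, hset⟩ :=
        ih (fun y => if y = x then f y - 1 else f y) (by simpa [hxv'] using hcnt)
      simp only [if_neg hxv'] at hjval
      refine ⟨j + 1, ?_, by simpa using hjlt, ?_, ?_⟩
      · rw [mask_cons,
          PySem.List.index?_cons_of_ne _ (by split_ifs <;> simp [hxv]), hidx]
        rfl
      · have hlen : f v < (occs xs v).length := by rw [length_occs]; exact hcnt
        rw [occs_cons, if_neg hxv]
        simp only [List.nil_append]
        rw [List.getD_eq_getElem _ _ (by simpa using hlen), List.getElem_map]
        rw [List.getD_eq_getElem _ _ hlen] at hjval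
        push_cast
        omega
      · rw [mask_cons, List.set_cons_succ, hset, mask_cons]
        have hhead : (if (if x = v then f x + 1 else f x) = 0 then some x else none)
            = (if f x = 0 then some x else none) := by simp [hxv]
        rw [hhead]
        have hg : (fun y => if y = v then (if y = x then f y - 1 else f y) + 1
                else (if y = x then f y - 1 else f y))
            = (fun y => if y = x then (if y = v then f y + 1 else f y) - 1
                else (if y = v then f y + 1 else f y)) := by
          funext y
          by_cases hy : y = x
          · by_cases hy2 : y = v
            · exact absurd (hy.symm.trans hy2) hxv
            · simp [hy, hxv]
          · by_cases hy2 : y = v <;> simp [hy, hy2, hxv']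
        rw [hg]

theorem bPositions_getD (init : List Int) (v : Int) :
    (bPositions init).getD v [] = occs init v := by
  unfold bPositions occs
  rw [show (PySem.List.enumerate init 0).foldl
        (fun d p => d.modify p.2 [] (· ++ [p.1])) PySem.Dict.empty
      = ((PySem.List.enumerate init 0).map (fun p => (p.2, p.1))).foldl
        (fun d p => d.modify p.1 [] (· ++ [p.2])) PySem.Dict.empty
      from (List.foldl_map (f := fun p : Int × Int => (p.2, p.1))
        (g := fun (d : PySem.Dict Int (List Int)) (p : Int × Int) => d.modify p.1 [] (· ++ [p.2]))
        (l := PySem.List.enumerate init 0) (init := PySem.Dict.empty)).symm]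
  rw [PySem.Dict.getD_foldl_modify_append]
  simp only [List.filter_map, List.map_map]
  rfl

-- the coupled loop invariant: after a steps, A's working list is the masked initial list,
-- B's cursors hold the per-value counts of the processed prefix, and the outputs agree
theorem loop_eq (init new : List Int)
    (hpre : ∀ v ∈ new.take init.length, (new.take init.length).count v ≤ init.count v)
    (hlen : init.length ≤ new.length) :
    ∀ (vs : List Int) (a : Nat) (cursor : PySem.Dict Int Int) (accB : List Int),
      a + vs.length = init.length →
      (new.drop a).take vs.length = vs →
      accB.length = a →
      (∀ y, cursor.getD y 0 = ((new.take a).count y : Int)) →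
      ((PySem.List.pyRange (a : Int) (init.length : Int) 1).foldl (aStep new)
          (accB ++ List.replicate vs.length (0 : Int),
           mask init (fun y => (new.take a).count y) ++ [none])).1
        = (vs.foldl (bStep (bPositions init)) (accB, cursor)).1 := by
  intro vs
  induction vs with
  | nil =>
    intro a cursor accB ha htake hacc hcur
    rw [PySem.List.pyRange_one_eq_nil (by simp at ha; omega)]
    simp
  | cons v vs ih =>
    intro a cursor accB ha htake hacc hcur
    have hna : a < init.length := by simp at ha; omega
    have hnew : a < new.length := by omega
    rw [List.drop_eq_getElem_cons hnew, List.length_cons, List.take_succ_cons] at htake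
    injection htake with hv htl
    have hmemv : v ∈ new.take init.length := by
      have hlt : a < (new.take init.length).length := by simp [List.length_take]; omega
      have : (new.take init.length)[a] = new[a] := List.getElem_take
      rw [← hv, ← this]
      exact List.getElem_mem hlt
    have hcy : ∀ y, (new.take (a+1)).count y
        = (new.take a).count y + if y = v then 1 else 0 := by
      intro y
      rw [List.take_add_one, List.getElem?_eq_getElem hnew, hv]
      by_cases hy : y = v
      · simp [List.count_append, hy]
      · simp [List.count_append, hy, Ne.symm hy]
    have hflt : (new.take a).count v < init.count v := by
      have h1 := hcy v
      have h2 : (new.take (a+1)).count v ≤ (new.take init.length).count v := by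
        have he : new.take (a+1) = (new.take init.length).take (a+1) := by
          rw [List.take_take]; congr 1; omega
        rw [he]; exact List.Sublist.count_le _ (List.take_sublist _ _)
      have h3 := hpre v hmemv
      simp at h1; omega
    obtain ⟨j, hidx, hjlt, hjval, hset⟩ := mask_index init v (fun y => (new.take a).count y) hflt
    have hmem_mask : some v ∈ mask init (fun y => (new.take a).count y) := by
      rw [← PySem.List.index?_isSome_iff, hidx]; rfl
    have hfun : (fun y => if y = v then (new.take a).count y + 1 else (new.take a).count y)
        = (fun y => (new.take (a+1)).count y) := by
      funext y; rw [hcy y]; by_cases hy : y = v <;> simp [hy]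
    have hstepA : aStep new (accB ++ List.replicate (v :: vs).length 0,
        mask init (fun y => (new.take a).count y) ++ [none]) (a : Int)
      = ((accB ++ [(j : Int)]) ++ List.replicate vs.length 0,
         mask init (fun y => (new.take (a+1)).count y) ++ [none]) := by
      unfold aStep
      rw [PySem.List.pyGet?_natCast, List.getElem?_eq_getElem hnew, hv]
      simp only []
      rw [PySem.List.index?_append_of_mem _ hmem_mask, hidx]
      simp only [Int.toNat_natCast, List.length_cons, List.replicate_succ]
      rw [List.set_append, if_neg (by simp [hacc]), hacc, Nat.sub_self,
        List.set_cons_zero]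
      rw [List.set_append, if_pos (by rw [length_mask]; exact hjlt), hset, hfun]
      simp
    rw [PySem.List.pyRange_one_cons (by omega), List.foldl_cons, hstepA,
      show ((a : Int) + 1) = ((a + 1 : Nat) : Int) from by push_cast; ring]
    have hstepB : bStep (bPositions init) (accB, cursor) v
        = (accB ++ [(j : Int)], cursor.insert v (((new.take a).count v : Int) + 1)) := by
      unfold bStep
      rw [hcur v, bPositions_getD]
      simp only [Int.toNat_natCast]
      rw [← hjval]
    rw [List.foldl_cons, hstepB]
    exact ih (a + 1) _ (accB ++ [(j : Int)]) (by simp at ha ⊢; omega)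
      htl
      (by simp [hacc])
      (by
        intro y
        rw [PySem.Dict.getD_insert, hcy y]
        by_cases hy : y = v
        · simp [hy]
        · simp [hy, hcur y])

theorem find_order_from_sequence_spec : Claim_equal_find_order_from_sequence := by
  intro init new _ hpre
  obtain ⟨hlen, hcount⟩ := hpre
  have hvslen : (new.take init.length).length = init.length := by
    simp [List.length_take]; omega
  have h0 := loop_eq init new hcount hlen (new.take init.length) 0 PySem.Dict.empty []
    (by simpa using hvslen) (by simp) rfl
    (by intro y; simp [PySem.Dict.getD_empty])
  have hf0 : (fun y => (new.take 0).count y) = (fun _ : Int => (0 : Nat)) := by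
    funext y; simp
  rw [hf0, mask_zero, hvslen] at h0
  unfold Spec_find_order_from_sequence find_order_from_sequence find_order_from_sequence_alt
  simpa using h0
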